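-- pv_equiv track=rewrite | github.com/GeorgeBeshay/ProblemSolving | CF_Phase_2_2/Data_Structure/P998B_Cutting.py | TheAmazingFunction
-- ===== SOURCE A (Python) =====
-- import math
--
-- def TheAmazingFunction(Arr: list, K: int):
--     Forward = []  # Counts The Number Of Even And Odd While Moving Forward        [Even, Odd]
--     Backward = []  # "        "                   "                Backward
--     ToBeSubtracted = [0, 0]
--     PriceList = dict()
--     Answer = 0
--     # --------------------  SEPARATOR  --------------------
--     for i in range(len(Arr)):
--         j = len(Arr) - i - 1
--         Forward.append([])
--         Backward.insert(0, [])
--         # --------------------  SEPARATOR  --------------------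
--         if i != 0:
--             Forward[i] = Forward[i - 1].copy()
--         else:
--             Forward[i] = [0, 0]
--         if Arr[i] % 2 == 0:
--             Forward[i][0] += 1
--         else:
--             Forward[i][1] += 1
--         # --------------------  SEPARATOR  --------------------
--         if j != len(Arr) - 1:
--             Backward[0] = Backward[1].copy()
--         else:
--             Backward[0] = [0, 0]
--         if Arr[j] % 2 == 0:
--             Backward[0][0] += 1
--         else:
--             Backward[0][1] += 1
--         # --------------------  SEPARATOR  --------------------
--     for i in range(1, len(Arr)-2, 2):
--         # --------------------  SEPARATOR  --------------------
--         TempForward = Forward[i].copy()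
--         TempForward[0] -= ToBeSubtracted[0]
--         TempForward[1] -= ToBeSubtracted[1]
--         # --------------------  SEPARATOR  --------------------
--         if (TempForward[0] == TempForward[1]) and \
--                 (Backward[i + 1][0] == Backward[i + 1][1]) and \
--                 (abs(Arr[i] - Arr[i + 1]) <= K):
--             if PriceList.get(abs(Arr[i] - Arr[i + 1])) is None:
--                 PriceList.update({abs(Arr[i] - Arr[i + 1]): 1})
--             else:
--                 PriceList.update({abs(Arr[i] - Arr[i + 1]): PriceList.get(abs(Arr[i] - Arr[i + 1]))+1})
--             ToBeSubtracted = Forward[i].copy()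
--     # --------------------  SEPARATOR  --------------------
--     Prices = list(PriceList.keys())
--     Prices.sort()
--     # --------------------  SEPARATOR  --------------------
--     for i in range(len(Prices)):
--         if K == 0:
--             break
--         else:
--             if Prices[i]*PriceList.get(Prices[i]) <= K:
--                 Answer += PriceList.get(Prices[i])
--                 K -= Prices[i]*PriceList.get(Prices[i])
--             else:
--                 Answer += math.floor(K / Prices[i])
--                 K -= math.floor(K / Prices[i]) * Prices[i]
--     return Answer
-- ===== SOURCE B (Python) =====
-- def TheAmazingFunction(Arr: list, K: int):
--     n = len(Arr)
--     # a usable cut needs both sides balanced, so the whole array must be balanced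
--     if sum(x % 2 for x in Arr) * 2 != n:
--         return 0
--     # one streaming pass: running (evens - odds) balance; collect affordable cut costs
--     costs = []
--     bal = 0
--     for i in range(n - 2):
--         bal += 1 if Arr[i] % 2 == 0 else -1
--         if bal == 0:
--             c = abs(Arr[i] - Arr[i + 1])
--             if c <= K:
--                 costs.append(c)
--     costs.sort()
--     # buy cuts one at a time, cheapest first
--     answer = 0
--     for c in costs:
--         if K == 0 or K < c:
--             break
--         answer += 1
--         K -= c
--     return answer
-- ===== Notes on version B (the rewrite author's own statement) =====
-- stated objective: faster
-- what changed: Replaces A's quadratic per-index Forward/Backward even-odd list construction (insert(0)/copy each step), ToBeSubtracted bookkeeping, price dictionary and grouped floor-division purchases by a single streaming parity-balance pass (with an early exit when the whole array is unbalanced) that collects the affordable cut costs into one flat list, then buys them one at a time in sorted order.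
import Mathlib
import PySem

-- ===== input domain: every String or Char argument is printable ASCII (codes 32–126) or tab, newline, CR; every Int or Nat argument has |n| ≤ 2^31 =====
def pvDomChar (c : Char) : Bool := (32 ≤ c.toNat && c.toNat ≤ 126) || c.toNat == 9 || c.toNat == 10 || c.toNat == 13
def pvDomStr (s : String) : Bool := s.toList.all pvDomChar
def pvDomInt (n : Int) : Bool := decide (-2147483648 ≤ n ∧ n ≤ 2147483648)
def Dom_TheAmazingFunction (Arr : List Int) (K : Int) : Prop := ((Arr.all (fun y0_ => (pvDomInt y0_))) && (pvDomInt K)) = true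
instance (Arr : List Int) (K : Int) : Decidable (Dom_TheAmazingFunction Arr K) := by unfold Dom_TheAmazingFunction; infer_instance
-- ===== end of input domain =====

-- B replaces A's quadratic Forward/Backward array building, price dictionary and grouped
-- division greedy by one streaming parity-balance pass (with an early exit when the whole
-- array is unbalanced) and a unit-step greedy over the flat sorted list of cut costs.
-- Objective: faster.

-- ===== PORT A =====

-- one iteration of A's first loop: append to Forward, prepend to Backward
-- (Backward[1] after 'insert(0, [])' is the previous head, read here from the old state)
def pvA_step1 (Arr : List Int) (n : Int) (st : List (Int × Int) × List (Int × Int)) (i : Int) :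
    List (Int × Int) × List (Int × Int) :=
  let j := n - i - 1
  let fb := if i ≠ 0 then PySem.List.pyGetD st.1 (i - 1) ((0 : Int), (0 : Int)) else ((0 : Int), (0 : Int))
  let fe := if PySem.Int.mod (PySem.List.pyGetD Arr i 0) 2 = 0 then (fb.1 + 1, fb.2) else (fb.1, fb.2 + 1)
  let bb := if j ≠ n - 1 then PySem.List.pyGetD st.2 0 ((0 : Int), (0 : Int)) else ((0 : Int), (0 : Int))
  let be := if PySem.Int.mod (PySem.List.pyGetD Arr j 0) 2 = 0 then (bb.1 + 1, bb.2) else (bb.1, bb.2 + 1)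
  (st.1 ++ [fe], be :: st.2)

-- 'if PriceList.get(c) is None: … else: …'
def pvA_bump (pl : PySem.Dict Int Int) (c : Int) : PySem.Dict Int Int :=
  match pl.get? c with
  | none => pl.insert c 1
  | some v => pl.insert c (v + 1)

-- one iteration of A's second loop (state = (ToBeSubtracted, PriceList))
def pvA_step2 (Arr : List Int) (K : Int) (F Bk : List (Int × Int))
    (st : (Int × Int) × PySem.Dict Int Int) (i : Int) : (Int × Int) × PySem.Dict Int Int :=
  let fi := PySem.List.pyGetD F i ((0 : Int), (0 : Int))
  let tf := (fi.1 - st.1.1, fi.2 - st.1.2)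
  let bi := PySem.List.pyGetD Bk (i + 1) ((0 : Int), (0 : Int))
  let c := |PySem.List.pyGetD Arr i 0 - PySem.List.pyGetD Arr (i + 1) 0|
  if tf.1 = tf.2 ∧ bi.1 = bi.2 ∧ c ≤ K then (fi, pvA_bump st.2 c) else st

-- A's third loop; the 'break' is the early return.  'PriceList.get(p)' is ported as getD 0:
-- every p comes from the dict's keys, so the default is never read.  'math.floor(K/p)' is
-- ported as floor division, exact here since in every reached state 0 ≤ k and 1 ≤ p with
-- both below 2^31, where float division followed by floor equals '//'.
def pvA_greedy (pl : PySem.Dict Int Int) : List Int → Int → Int → Int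
  | [], ans, _ => ans
  | p :: rest, ans, k =>
    if k = 0 then ans
    else
      let c := pl.getD p 0
      if p * c ≤ k then pvA_greedy pl rest (ans + c) (k - p * c)
      else pvA_greedy pl rest (ans + PySem.Int.floordiv k p) (k - PySem.Int.floordiv k p * p)

def TheAmazingFunction (Arr : List Int) (K : Int) : Int :=
  let n := PySem.List.len Arr
  let fb := (PySem.List.pyRange 0 n 1).foldl (pvA_step1 Arr n) ([], [])
  let pl := ((PySem.List.pyRange 1 (n - 2) 2).foldl (pvA_step2 Arr K fb.1 fb.2)
      (((0 : Int), (0 : Int)), PySem.Dict.empty)).2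
  pvA_greedy pl (PySem.List.sorted pl.keys (fun x => x)) 0 K

-- ===== PORT B =====

-- B's single pass: running balance (evens − odds) and the affordable cut costs so far
def pvB_scan (Arr : List Int) (K : Int) (st : Int × List Int) (i : Int) : Int × List Int :=
  let bal := st.1 + (if PySem.Int.mod (PySem.List.pyGetD Arr i 0) 2 = 0 then 1 else -1)
  if bal = 0 then
    let c := |PySem.List.pyGetD Arr i 0 - PySem.List.pyGetD Arr (i + 1) 0|
    if c ≤ K then (bal, st.2 ++ [c]) else (bal, st.2)
  else (bal, st.2)

-- B's greedy: buy sorted costs one at a time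
def pvB_take : List Int → Int → Int → Int
  | [], ans, _ => ans
  | c :: rest, ans, k => if k = 0 ∨ k < c then ans else pvB_take rest (ans + 1) (k - c)

def TheAmazingFunction_alt (Arr : List Int) (K : Int) : Int :=
  let n := PySem.List.len Arr
  if (Arr.map (fun x => PySem.Int.mod x 2)).sum * 2 ≠ n then 0
  else
    let costs := ((PySem.List.pyRange 0 (n - 2) 1).foldl (pvB_scan Arr K) (0, [])).2
    pvB_take (PySem.List.sorted costs (fun x => x)) 0 K

-- ===== PRECONDITION & SPEC =====
def Spec_TheAmazingFunction (Arr : List Int) (K : Int) (out : Int) : Prop := out = TheAmazingFunction_alt Arr K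
instance (Arr : List Int) (K : Int) (out : Int) : Decidable (Spec_TheAmazingFunction Arr K out) := by unfold Spec_TheAmazingFunction; infer_instance

-- ===== CLAIM (what is proved, stated in full; the proofs are below) =====
def Claim_equal_TheAmazingFunction : Prop := ∀ (Arr : List Int) (K : Int), Dom_TheAmazingFunction Arr K → Spec_TheAmazingFunction Arr K (TheAmazingFunction Arr K)

-- ===== LEMMAS AND PROOFS =====

-- number of odd entries of l, as Python computes it (sum of x % 2)
def pvOd (l : List Int) : Int := (l.map (fun x => PySem.Int.mod x 2)).sum

-- the (even, odd) count pair A keeps for a segment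
def pvCnt (l : List Int) : Int × Int := ((l.length : Int) - pvOd l, pvOd l)

-- B's running balance: evens − odds
def pvBal (l : List Int) : Int := (l.length : Int) - 2 * pvOd l

-- the cost of the cut between positions i and i+1
def pvCost (Arr : List Int) (i : Int) : Int :=
  |PySem.List.pyGetD Arr i 0 - PySem.List.pyGetD Arr (i + 1) 0|

-- A's cut condition at index u, arithmetically
def pvCA (Arr : List Int) (K : Int) (u : Nat) : Bool :=
  decide (2 * pvOd (Arr.take (u + 1)) = (u : Int) + 1 ∧
    2 * (pvOd Arr - pvOd (Arr.take (u + 1))) = (Arr.length : Int) - u - 1 ∧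
    pvCost Arr u ≤ K)

-- B's cut condition at index u
def pvCB (Arr : List Int) (K : Int) (u : Nat) : Bool :=
  decide (pvBal (Arr.take (u + 1)) = 0 ∧ pvCost Arr u ≤ K)

-- the multiset of affordable cut costs
def pvM (Arr : List Int) (K : Int) : List Int :=
  ((List.range (Arr.length - 2)).filter (pvCB Arr K)).map (fun (u : Nat) => pvCost Arr (u : Int))

def pvMA (Arr : List Int) (K : Int) : List Int :=
  ((List.range (Arr.length - 2)).filter (pvCA Arr K)).map (fun (u : Nat) => pvCost Arr (u : Int))

def pvF (Arr : List Int) : List (Int × Int) := (List.range Arr.length).map (fun t => pvCnt (Arr.take (t + 1)))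
def pvBk (Arr : List Int) : List (Int × Int) := (List.range Arr.length).map (fun t => pvCnt (Arr.drop t))

theorem pv_mod_two (x : Int) : PySem.Int.mod x 2 = 0 ∨ PySem.Int.mod x 2 = 1 := by
  have h1 := PySem.Int.mod_nonneg x (b := 2) (by norm_num)
  have h2 := PySem.Int.mod_lt x (b := 2) (by norm_num)
  omega

theorem pvOd_append (l₁ l₂ : List Int) : pvOd (l₁ ++ l₂) = pvOd l₁ + pvOd l₂ := by
  simp [pvOd]

theorem pvCnt_snoc (l : List Int) (x : Int) :
    pvCnt (l ++ [x]) = if PySem.Int.mod x 2 = 0 then ((pvCnt l).1 + 1, (pvCnt l).2)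
      else ((pvCnt l).1, (pvCnt l).2 + 1) := by
  unfold pvCnt pvOd
  rcases pv_mod_two x with h | h <;>
    simp only [List.map_append, List.map_cons, List.map_nil, List.sum_append, List.sum_cons,
      List.sum_nil, List.length_append, List.length_cons, List.length_nil, h, add_zero,
      one_ne_zero, Prod.mk.injEq, reduceIte] <;>
    constructor <;> push_cast <;> omega

theorem pvCnt_cons (x : Int) (l : List Int) :
    pvCnt (x :: l) = if PySem.Int.mod x 2 = 0 then ((pvCnt l).1 + 1, (pvCnt l).2)
      else ((pvCnt l).1, (pvCnt l).2 + 1) := by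
  unfold pvCnt pvOd
  rcases pv_mod_two x with h | h <;>
    simp only [List.map_cons, List.sum_cons, List.length_cons, h, one_ne_zero,
      Prod.mk.injEq, reduceIte] <;>
    constructor <;> push_cast <;> omega

theorem pvBal_snoc (l : List Int) (x : Int) :
    pvBal (l ++ [x]) = pvBal l + (if PySem.Int.mod x 2 = 0 then 1 else -1) := by
  unfold pvBal
  rw [pvOd_append, List.length_append]
  have hx : pvOd [x] = PySem.Int.mod x 2 := by simp [pvOd]
  rw [hx]
  rcases pv_mod_two x with h | h <;> rw [h] <;> simp <;> omega

theorem pvLoop1Aux (Arr : List Int) (m : Nat) (hm : m ≤ Arr.length) :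
    (PySem.List.pyRange 0 (m : Int) 1).foldl (pvA_step1 Arr (Arr.length : Int)) ([], []) =
    ((List.range m).map (fun t => pvCnt (Arr.take (t + 1))),
     (List.range m).map (fun t => pvCnt (Arr.drop (Arr.length - m + t)))) := by
  induction m with
  | zero => simp [PySem.List.pyRange_one_eq_nil]
  | succ m ih =>
    have hmlt : m < Arr.length := hm
    rw [show ((m + 1 : Nat) : Int) = (m : Int) + 1 by push_cast; ring,
        PySem.List.pyRange_one_succ_right (Int.natCast_nonneg m),
        List.foldl_append, ih (Nat.le_of_succ_le hm)]
    simp only [List.foldl_cons, List.foldl_nil]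
    unfold pvA_step1
    dsimp only
    have hfb : (if (m : Int) ≠ 0 then
          PySem.List.pyGetD ((List.range m).map (fun t => pvCnt (Arr.take (t + 1)))) ((m : Int) - 1)
            ((0 : Int), (0 : Int)) else ((0 : Int), (0 : Int))) = pvCnt (Arr.take m) := by
      cases m with
      | zero => simp [pvCnt, pvOd]
      | succ s =>
        rw [if_pos (by exact_mod_cast Nat.succ_ne_zero s),
            show ((s + 1 : Nat) : Int) - 1 = ((s : Nat) : Int) by push_cast; ring,
            PySem.List.pyGetD_natCast]
        rw [PySem.List.getD_map_range _ _ _ _ (Nat.lt_succ_self s)]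
    have hArrm : PySem.List.pyGetD Arr ((m : Nat) : Int) 0 = Arr[m] := by
      rw [PySem.List.pyGetD_natCast, List.getD_eq_getElem _ _ hmlt]
    have htake : Arr.take (m + 1) = Arr.take m ++ [Arr[m]] := by
      rw [List.take_add_one, List.getElem?_eq_getElem hmlt]; rfl
    have hj : ((Arr.length : Int) - (m : Int) - 1) = ((Arr.length - m - 1 : Nat) : Int) := by omega
    have hArrj : PySem.List.pyGetD Arr ((Arr.length : Int) - (m : Int) - 1) 0 = Arr[Arr.length - m - 1] := by
      rw [hj, PySem.List.pyGetD_natCast, List.getD_eq_getElem _ _ (by omega)]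
    have hbb : (if ((Arr.length : Int) - (m : Int) - 1) ≠ (Arr.length : Int) - 1 then
          PySem.List.pyGetD ((List.range m).map (fun t => pvCnt (Arr.drop (Arr.length - m + t)))) 0
            ((0 : Int), (0 : Int)) else ((0 : Int), (0 : Int))) = pvCnt (Arr.drop (Arr.length - m)) := by
      cases m with
      | zero => simp [pvCnt, pvOd, List.drop_length]
      | succ s =>
        rw [if_pos (by push_cast; omega), PySem.List.pyGetD_zero,
            PySem.List.getD_map_range _ _ _ _ (Nat.succ_pos s), Nat.add_zero]
    have hdrop : Arr.drop (Arr.length - m - 1) = Arr[Arr.length - m - 1] :: Arr.drop (Arr.length - m) := by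
      rw [List.drop_eq_getElem_cons (by omega)]
      congr 2
      omega
    rw [hfb, hArrm, hbb, hArrj]
    refine Prod.ext ?_ ?_ <;> dsimp only
    · rw [List.range_succ, List.map_append, List.map_singleton]
      congr 1
      rw [htake, pvCnt_snoc]
    · rw [List.range_succ_eq_map, List.map_cons, List.map_map]
      congr 1
      · rw [show Arr.length - (m + 1) + 0 = Arr.length - m - 1 by omega, hdrop, pvCnt_cons]
      · apply List.map_congr_left
        intro t ht
        have ht' : t < m := List.mem_range.mp ht
        simp only [Function.comp_apply]
        congr 2
        omega

theorem pvLoop1 (Arr : List Int) :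
    (PySem.List.pyRange 0 (Arr.length : Int) 1).foldl (pvA_step1 Arr (Arr.length : Int)) ([], []) =
    (pvF Arr, pvBk Arr) := by
  rw [pvLoop1Aux Arr Arr.length le_rfl]
  unfold pvF pvBk
  simp

theorem pvBumpEq (pl : PySem.Dict Int Int) (c : Int) :
    pvA_bump pl c = pl.insert c (pl.getD c 0 + 1) := by
  unfold pvA_bump
  rw [PySem.Dict.getD_eq_get?_getD]
  cases h : pl.get? c <;> simp

theorem pvTbsElim (Arr : List Int) (K : Int) (F Bk : List (Int × Int)) (is : List Int)
    (tbs : Int × Int) (pl : PySem.Dict Int Int) (h : tbs.1 = tbs.2) :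
    (is.foldl (pvA_step2 Arr K F Bk) (tbs, pl)).2 =
    is.foldl (fun pl i =>
      if (PySem.List.pyGetD F i ((0 : Int), (0 : Int))).1 = (PySem.List.pyGetD F i ((0 : Int), (0 : Int))).2 ∧
         (PySem.List.pyGetD Bk (i + 1) ((0 : Int), (0 : Int))).1 = (PySem.List.pyGetD Bk (i + 1) ((0 : Int), (0 : Int))).2 ∧
         |PySem.List.pyGetD Arr i 0 - PySem.List.pyGetD Arr (i + 1) 0| ≤ K
      then pvA_bump pl (|PySem.List.pyGetD Arr i 0 - PySem.List.pyGetD Arr (i + 1) 0|) else pl) pl := by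
  induction is generalizing tbs pl with
  | nil => rfl
  | cons i rest ih =>
    simp only [List.foldl_cons]
    unfold pvA_step2
    dsimp only
    by_cases hc : (PySem.List.pyGetD F i ((0 : Int), (0 : Int))).1 = (PySem.List.pyGetD F i ((0 : Int), (0 : Int))).2 ∧
        (PySem.List.pyGetD Bk (i + 1) ((0 : Int), (0 : Int))).1 = (PySem.List.pyGetD Bk (i + 1) ((0 : Int), (0 : Int))).2 ∧
        |PySem.List.pyGetD Arr i 0 - PySem.List.pyGetD Arr (i + 1) 0| ≤ K
    · obtain ⟨hc1, hc2, hc3⟩ := hc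
      rw [if_pos ⟨by omega, hc2, hc3⟩, if_pos ⟨hc1, hc2, hc3⟩]
      exact ih _ _ hc1
    · rw [if_neg (by intro hA; exact hc ⟨by omega, hA.2⟩), if_neg hc]
      exact ih _ _ h

-- step-2 range = odd entries of range, Nat side
theorem pvFilterOddRange (N : Nat) :
    (List.range N).filter (fun u => decide (u % 2 = 1)) = (List.range (N / 2)).map (fun k => 2 * k + 1) := by
  induction N with
  | zero => rfl
  | succ N ih =>
    rw [List.range_succ, List.filter_append, ih]
    by_cases h : N % 2 = 1
    · have h2 : (N + 1) / 2 = N / 2 + 1 := by omega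
      rw [h2, List.range_succ, List.map_append]
      simp only [List.filter_cons, List.filter_nil, h, decide_true]
      congr 2
      simp
      omega
    · have h2 : (N + 1) / 2 = N / 2 := by omega
      rw [h2]
      simp [h]

theorem pvR2 (N : Nat) :
    PySem.List.pyRange 1 (N : Int) 2 =
    ((List.range N).filter (fun u => decide (u % 2 = 1))).map (fun (u : Nat) => (u : Int)) := by
  rw [pvFilterOddRange, PySem.List.pyRange_of_pos 1 (N : Int) (by norm_num), List.map_map]
  by_cases h : 1 < (N : Int)
  · rw [if_pos h]
    have h2 : ((N : Int) - 1 + 2 - 1) / 2 = ((N / 2 : Nat) : Int) := by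
      rw [show ((N : Int) - 1 + 2 - 1) = (N : Int) by ring, Int.natCast_div]
      norm_num
    rw [h2, Int.toNat_natCast]
    apply List.map_congr_left
    intro k _
    simp only [Function.comp_apply]
    push_cast
    ring
  · rw [if_neg h]
    have : N / 2 = 0 := by omega
    rw [this]
    rfl

-- converting A's raw condition to the arithmetic one
theorem pvPraw_eq (Arr : List Int) (K : Int) (u : Nat) (hu : u < Arr.length - 2) :
    (decide ((PySem.List.pyGetD (pvF Arr) ((u : Int)) ((0 : Int), (0 : Int))).1 =
        (PySem.List.pyGetD (pvF Arr) ((u : Int)) ((0 : Int), (0 : Int))).2 ∧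
      (PySem.List.pyGetD (pvBk Arr) ((u : Int) + 1) ((0 : Int), (0 : Int))).1 =
        (PySem.List.pyGetD (pvBk Arr) ((u : Int) + 1) ((0 : Int), (0 : Int))).2 ∧
      |PySem.List.pyGetD Arr (u : Int) 0 - PySem.List.pyGetD Arr ((u : Int) + 1) 0| ≤ K)) =
    pvCA Arr K u := by
  unfold pvF pvBk pvCA pvCost
  rw [decide_eq_decide]
  have hu1 : u < Arr.length := by omega
  have hu2 : u + 1 < Arr.length := by omega
  rw [PySem.List.pyGetD_natCast, PySem.List.getD_map_range _ _ _ _ hu1,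
      show ((u : Int) + 1) = ((u + 1 : Nat) : Int) by push_cast; ring,
      PySem.List.pyGetD_natCast, PySem.List.getD_map_range _ _ _ _ hu2]
  have hlt : (Arr.take (u + 1)).length = u + 1 := by rw [List.length_take]; omega
  have hld : (Arr.drop (u + 1)).length = Arr.length - (u + 1) := by rw [List.length_drop]
  have hsplit : pvOd Arr = pvOd (Arr.take (u + 1)) + pvOd (Arr.drop (u + 1)) := by
    rw [← pvOd_append, List.take_append_drop]
  unfold pvCnt
  rw [hlt, hld]
  constructor
  · rintro ⟨h1, h2, h3⟩
    refine ⟨by omega, by omega, by push_cast; exact h3⟩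
  · rintro ⟨h1, h2, h3⟩
    refine ⟨by omega, by omega, by push_cast at h3 ⊢; exact h3⟩

-- pvCA holds only at odd indices
theorem pvCA_odd (Arr : List Int) (K : Int) (u : Nat) (h : pvCA Arr K u = true) : u % 2 = 1 := by
  unfold pvCA at h
  rw [decide_eq_true_iff] at h
  obtain ⟨h1, -, -⟩ := h
  omega

-- A's dictionary is the counter of the cost multiset
theorem pvDictEq (Arr : List Int) (K : Int) :
    ((PySem.List.pyRange 1 ((Arr.length : Int) - 2) 2).foldl (pvA_step2 Arr K (pvF Arr) (pvBk Arr))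
      (((0 : Int), (0 : Int)), PySem.Dict.empty)).2 = PySem.Dict.counter (pvMA Arr K) := by
  rw [pvTbsElim _ _ _ _ _ _ _ rfl]
  simp only [pvBumpEq]
  rw [PySem.List.foldl_ite_eq_foldl_filter]
  have hrange : PySem.List.pyRange 1 ((Arr.length : Int) - 2) 2 =
      ((List.range (Arr.length - 2)).filter (fun u => decide (u % 2 = 1))).map
        (fun (u : Nat) => (u : Int)) := by
    by_cases h2 : 2 ≤ Arr.length
    · rw [show ((Arr.length : Int) - 2) = ((Arr.length - 2 : Nat) : Int) by omega, pvR2]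
    · rw [show Arr.length - 2 = 0 by omega,
          PySem.List.pyRange_of_pos 1 ((Arr.length : Int) - 2) (by norm_num),
          if_neg (by omega)]
      rfl
  rw [hrange, List.filter_map, List.filter_filter]
  have hcongr : ∀ u ∈ List.range (Arr.length - 2),
      (((fun i => decide ((PySem.List.pyGetD (pvF Arr) i ((0 : Int), (0 : Int))).1 =
          (PySem.List.pyGetD (pvF Arr) i ((0 : Int), (0 : Int))).2 ∧
        (PySem.List.pyGetD (pvBk Arr) (i + 1) ((0 : Int), (0 : Int))).1 =
          (PySem.List.pyGetD (pvBk Arr) (i + 1) ((0 : Int), (0 : Int))).2 ∧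
        |PySem.List.pyGetD Arr i 0 - PySem.List.pyGetD Arr (i + 1) 0| ≤ K)) ∘
          (fun (u : Nat) => (u : Int))) u && decide (u % 2 = 1)) = pvCA Arr K u := by
    intro u hu
    have hu' : u < Arr.length - 2 := List.mem_range.mp hu
    simp only [Function.comp_apply]
    rw [pvPraw_eq Arr K u hu']
    cases hca : pvCA Arr K u with
    | false => simp
    | true => simp [pvCA_odd Arr K u hca]
  rw [List.filter_congr hcongr, ← PySem.Dict.foldl_insert_getD_add_one_eq_counter,
      pvMA]
  rw [List.foldl_map, List.foldl_map]
  rfl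

-- B's scan loop computes the balance and the cost list
theorem pvScanAux (Arr : List Int) (K : Int) (m : Nat) (hm : m ≤ Arr.length) :
    (PySem.List.pyRange 0 (m : Int) 1).foldl (pvB_scan Arr K) (0, []) =
    (pvBal (Arr.take m), ((List.range m).filter (pvCB Arr K)).map (fun (u : Nat) => pvCost Arr (u : Int))) := by
  induction m with
  | zero => simp [PySem.List.pyRange_one_eq_nil, pvBal, pvOd]
  | succ m ih =>
    have hmlt : m < Arr.length := hm
    rw [show ((m + 1 : Nat) : Int) = (m : Int) + 1 by push_cast; ring,
        PySem.List.pyRange_one_succ_right (Int.natCast_nonneg m),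
        List.foldl_append, ih (Nat.le_of_succ_le hm)]
    simp only [List.foldl_cons, List.foldl_nil]
    unfold pvB_scan
    dsimp only
    have hArrm : PySem.List.pyGetD Arr ((m : Nat) : Int) 0 = Arr[m] := by
      rw [PySem.List.pyGetD_natCast, List.getD_eq_getElem _ _ hmlt]
    have htake : Arr.take (m + 1) = Arr.take m ++ [Arr[m]] := by
      rw [List.take_add_one, List.getElem?_eq_getElem hmlt]; rfl
    have hbal : pvBal (Arr.take m) +
        (if PySem.Int.mod (PySem.List.pyGetD Arr (m : Int) 0) 2 = 0 then 1 else -1) =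
        pvBal (Arr.take (m + 1)) := by
      rw [hArrm, htake, pvBal_snoc]
    rw [hbal, List.range_succ, List.filter_append, List.map_append]
    by_cases h0 : pvBal (Arr.take (m + 1)) = 0
    · rw [if_pos h0]
      by_cases hK : pvCost Arr (m : Int) ≤ K
      · rw [if_pos (by unfold pvCost at hK; exact hK)]
        have : pvCB Arr K m = true := by unfold pvCB; rw [decide_eq_true_iff]; exact ⟨h0, hK⟩
        simp [this, pvCost]
      · rw [if_neg (by unfold pvCost at hK; exact hK)]
        have : pvCB Arr K m = false := by
          unfold pvCB; rw [decide_eq_false_iff_not]; rintro ⟨-, h⟩; exact hK h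
        simp [this]
    · rw [if_neg h0]
      have : pvCB Arr K m = false := by
        unfold pvCB; rw [decide_eq_false_iff_not]; rintro ⟨h, -⟩; exact h0 h
      simp [this]

-- under global balance the two cut conditions agree
theorem pvCA_eq_pvCB (Arr : List Int) (K : Int) (hG : 2 * pvOd Arr = (Arr.length : Int))
    (u : Nat) (hu : u < Arr.length - 2) : pvCA Arr K u = pvCB Arr K u := by
  unfold pvCA pvCB pvBal
  rw [decide_eq_decide]
  have hlen : (Arr.take (u + 1)).length = u + 1 := by
    rw [List.length_take]; omega
  rw [hlen]
  constructor
  · rintro ⟨h1, h2, h3⟩; exact ⟨by omega, h3⟩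
  · rintro ⟨h1, h3⟩; exact ⟨by omega, by omega, h3⟩

-- without global balance no cut qualifies
theorem pvCA_false (Arr : List Int) (K : Int) (hG : 2 * pvOd Arr ≠ (Arr.length : Int))
    (u : Nat) : pvCA Arr K u = false := by
  unfold pvCA
  rw [decide_eq_false_iff_not]
  rintro ⟨h1, h2, -⟩
  omega

-- counts in the regrouped flat list
theorem pvCountFlat (M : List Int) (ps : List Int) (hnd : ps.Nodup) (v : Int) :
    List.count v (ps.flatMap (fun p => List.replicate (M.count p) p)) =
    if v ∈ ps then M.count v else 0 := by
  induction ps with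
  | nil => simp
  | cons p rest ih =>
    rw [List.flatMap_cons, List.count_append, List.count_replicate,
        ih (List.nodup_cons.mp hnd).2]
    by_cases hv : p = v
    · subst hv
      simp [(List.nodup_cons.mp hnd).1]
    · have hv' : ¬v = p := fun h => hv h.symm
      by_cases hm : v ∈ rest <;> simp [hv, hv', hm]

theorem pvFlatSorted (M : List Int) (ps : List Int) (hps : ps.Pairwise (· < ·)) :
    (ps.flatMap (fun p => List.replicate (M.count p) p)).Pairwise (· ≤ ·) := by
  induction ps with
  | nil => simp
  | cons p rest ih =>
    rw [List.flatMap_cons, List.pairwise_append]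
    refine ⟨?_, ih (List.pairwise_cons.mp hps).2, ?_⟩
    · exact List.pairwise_replicate.mpr (Or.inr le_rfl)
    · intro a ha b hb
      rw [List.eq_of_mem_replicate ha]
      obtain ⟨q, hq, hb'⟩ := List.mem_flatMap.mp hb
      rw [List.eq_of_mem_replicate hb']
      exact ((List.pairwise_cons.mp hps).1 q hq).le

-- sorted multiset = groups of the sorted distinct values
theorem pvSortedFlat (M : List Int) :
    PySem.List.sorted M (fun x => x) =
    (PySem.List.sorted (PySem.Set.ofList M) (fun x => x)).flatMap
      (fun p => List.replicate (M.count p) p) := by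
  have hlt := PySem.List.sorted_ofList_pairwise_lt (κ := Int) M
  have hnd : (PySem.List.sorted (PySem.Set.ofList M) (fun x => x)).Nodup :=
    hlt.imp (fun h => ne_of_lt h)
  apply PySem.List.sorted_id_eq_of_perm_of_pairwise
  · rw [List.perm_iff_count]
    intro v
    rw [pvCountFlat M _ hnd v]
    by_cases hv : v ∈ PySem.List.sorted (PySem.Set.ofList M) (fun x => x)
    · rw [if_pos hv]
    · rw [if_neg hv]
      have : v ∉ M := fun h => hv
        ((PySem.List.mem_sorted _ _ _ _).mpr ((PySem.Set.mem_ofList M v).mpr h))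
      exact (List.count_eq_zero.mpr this).symm
  · exact pvFlatSorted M _ hlt

theorem pvA_greedy_cons (pl : PySem.Dict Int Int) (p : Int) (rest : List Int) (ans k : Int) :
    pvA_greedy pl (p :: rest) ans k =
    if k = 0 then ans
    else if p * pl.getD p 0 ≤ k then pvA_greedy pl rest (ans + pl.getD p 0) (k - p * pl.getD p 0)
    else pvA_greedy pl rest (ans + PySem.Int.floordiv k p) (k - PySem.Int.floordiv k p * p) := rfl

theorem pvB_take_cons (c : Int) (rest : List Int) (ans k : Int) :
    pvB_take (c :: rest) ans k = if k = 0 ∨ k < c then ans else pvB_take rest (ans + 1) (k - c) := rfl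

-- A's greedy adds nothing once every remaining price exceeds the budget
theorem pvGreedyNil (pl : PySem.Dict Int Int) (ps : List Int) :
    ∀ (ans k : Int), 0 ≤ k → (∀ p ∈ ps, k < p ∧ 1 ≤ pl.getD p 0) →
    pvA_greedy pl ps ans k = ans := by
  induction ps with
  | nil => intro ans k _ _; rfl
  | cons p rest ih =>
    intro ans k hk h
    obtain ⟨hkp, hc⟩ := h p List.mem_cons_self
    rw [pvA_greedy_cons]
    by_cases hk0 : k = 0
    · simp [hk0]
    · rw [if_neg hk0]
      have hp : 0 < p := by omega
      have hmul : p * 1 ≤ p * pl.getD p 0 := by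
        apply mul_le_mul_of_nonneg_left hc hp.le
      rw [if_neg (by omega)]
      have hdiv : PySem.Int.floordiv k p = 0 := by
        rw [PySem.Int.floordiv_eq_ediv_of_pos hp]
        exact Int.ediv_eq_zero_of_lt hk hkp
      rw [hdiv]
      rw [show ans + 0 = ans by ring, show k - 0 * p = k by ring]
      exact ih ans k hk (fun q hq => h q (List.mem_cons_of_mem p hq))

theorem pvTakeRep (p : Int) (hp : 0 ≤ p) (cnt : Nat) :
    ∀ (rest : List Int) (ans k : Int), (cnt = 0 ∨ 0 < k) → p * cnt ≤ k →
    pvB_take (List.replicate cnt p ++ rest) ans k = pvB_take rest (ans + cnt) (k - p * cnt) := by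
  induction cnt with
  | zero => intro rest ans k _ _; simp
  | succ c ih =>
    intro rest ans k hk hle
    have hk' : 0 < k := hk.resolve_left (by omega)
    have h0 : (0 : Int) ≤ p * c := mul_nonneg hp (by positivity)
    have hexp : p * ((c : Int) + 1) = p * c + p := by ring
    have hle' : p * (c : Int) + p ≤ k := by
      push_cast at hle; rw [← hexp]; exact hle
    rw [List.replicate_succ, List.cons_append, pvB_take_cons]
    rw [if_neg (by omega)]
    have hrec : c = 0 ∨ 0 < k - p := by
      by_cases hc : c = 0
      · exact Or.inl hc
      · refine Or.inr ?_
        by_cases hp0 : p = 0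
        · omega
        · have hp1 : 0 < p := by omega
          have : p * 1 ≤ p * c := by
            apply mul_le_mul_of_nonneg_left _ hp1.le
            exact_mod_cast Nat.one_le_iff_ne_zero.mpr hc
          omega
    rw [ih rest (ans + 1) (k - p) hrec (by omega)]
    congr 1 <;> push_cast <;> ring

theorem pvTakePart (p : Int) (hp : 0 < p) (cnt : Nat) :
    ∀ (rest : List Int) (ans k : Int), 0 ≤ k → k < p * cnt →
    pvB_take (List.replicate cnt p ++ rest) ans k = ans + PySem.Int.floordiv k p := by
  induction cnt with
  | zero => intro rest ans k hk hlt; simp at hlt; omega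
  | succ c ih =>
    intro rest ans k hk hlt
    rw [List.replicate_succ, List.cons_append, pvB_take_cons]
    by_cases hstop : k = 0 ∨ k < p
    · rw [if_pos hstop]
      have : PySem.Int.floordiv k p = 0 := by
        rw [PySem.Int.floordiv_eq_ediv_of_pos hp]
        rcases hstop with h | h
        · rw [h, Int.zero_ediv]
        · exact Int.ediv_eq_zero_of_lt hk h
      omega
    · rw [if_neg hstop]
      obtain ⟨hk0, hkp'⟩ := not_or.mp hstop
      have hkp : p ≤ k := by omega
      have hexp : p * ((c : Int) + 1) = p * c + p := by ring
      have hlt' : k - p < p * c := by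
        push_cast at hlt; rw [hexp] at hlt; omega
      rw [ih rest (ans + 1) (k - p) (by omega) hlt']
      have : PySem.Int.floordiv (k - p) p = PySem.Int.floordiv k p - 1 := by
        rw [PySem.Int.floordiv_eq_ediv_of_pos hp, PySem.Int.floordiv_eq_ediv_of_pos hp,
            show k - p = k + (-1) * p by ring, Int.add_mul_ediv_right _ _ (ne_of_gt hp)]
        ring
      omega

-- grouped greedy = unit greedy
theorem pvGreedyEq (pl : PySem.Dict Int Int) (M : List Int)
    (h : ∀ p, pl.getD p 0 = (M.count p : Int)) (ps : List Int) :
    ∀ (ans k : Int), ps.Pairwise (· < ·) → (∀ p ∈ ps, 0 ≤ p ∧ p ∈ M) → 0 ≤ k →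
    pvA_greedy pl ps ans k = pvB_take (ps.flatMap (fun p => List.replicate (M.count p) p)) ans k := by
  induction ps with
  | nil => intro ans k _ _ _; rfl
  | cons p rest ih =>
    intro ans k hps hmem hk
    obtain ⟨hp0, hpM⟩ := hmem p List.mem_cons_self
    have hcnt : 0 < M.count p := List.count_pos_iff.mpr hpM
    obtain ⟨c, hc⟩ : ∃ c, M.count p = c + 1 := ⟨M.count p - 1, by omega⟩
    rw [List.flatMap_cons, pvA_greedy_cons]
    by_cases hk0 : k = 0
    · rw [if_pos hk0, hc, List.replicate_succ, List.cons_append, pvB_take_cons]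
      rw [if_pos (Or.inl hk0)]
    · rw [if_neg hk0]
      have hgd : pl.getD p 0 = (M.count p : Int) := h p
      by_cases hfull : p * pl.getD p 0 ≤ k
      · rw [if_pos hfull]
        rw [pvTakeRep p hp0 (M.count p) _ ans k (Or.inr (by omega))
            (by rw [hgd] at hfull; exact hfull)]
        rw [hgd]
        exact ih _ _ (List.pairwise_cons.mp hps).2
          (fun q hq => hmem q (List.mem_cons_of_mem p hq)) (by rw [hgd] at hfull; omega)
      · rw [if_neg hfull]
        have hppos : 0 < p := by
          rcases lt_or_eq_of_le hp0 with h' | h'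
          · exact h'
          · exfalso; apply hfull; rw [← h']; simpa using hk
        have hlt : k < p * (M.count p : Int) := by
          rw [hgd] at hfull; omega
        rw [pvTakePart p hppos (M.count p) _ ans k hk hlt]
        have hcomm : k / p * p = p * (k / p) := mul_comm _ _
        have hmod0 : 0 ≤ k - PySem.Int.floordiv k p * p := by
          rw [PySem.Int.floordiv_eq_ediv_of_pos hppos]
          have h1 := Int.emod_nonneg k (ne_of_gt hppos)
          rw [Int.emod_def] at h1
          linarith
        have hmodp : k - PySem.Int.floordiv k p * p < p := by
          rw [PySem.Int.floordiv_eq_ediv_of_pos hppos]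
          have h1 := Int.emod_lt_of_pos k hppos
          rw [Int.emod_def] at h1
          linarith
        rw [pvGreedyNil pl rest _ _ hmod0 ?_]
        intro q hq
        have hpq : p < q := (List.pairwise_cons.mp hps).1 q hq
        refine ⟨by omega, ?_⟩
        rw [h q]
        have : q ∈ M := (hmem q (List.mem_cons_of_mem p hq)).2
        have := List.count_pos_iff.mpr this
        omega

theorem pvMain (Arr : List Int) (K : Int) :
    TheAmazingFunction Arr K = TheAmazingFunction_alt Arr K := by
  unfold TheAmazingFunction TheAmazingFunction_alt
  simp only [PySem.List.len_eq, pvLoop1]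
  rw [pvDictEq, PySem.Dict.keys_counter]
  by_cases hB : (List.map (fun x => PySem.Int.mod x 2) Arr).sum * 2 = (Arr.length : Int)
  · rw [if_neg (fun h => h hB)]
    have hOd : pvOd Arr = (List.map (fun x => PySem.Int.mod x 2) Arr).sum := rfl
    have hG : 2 * pvOd Arr = (Arr.length : Int) := by omega
    have hMA : pvMA Arr K = pvM Arr K := by
      unfold pvMA pvM
      exact congrArg _ (List.filter_congr
        (fun u hu => pvCA_eq_pvCB Arr K hG u (List.mem_range.mp hu)))
    have hr : PySem.List.pyRange 0 ((Arr.length : Int) - 2) 1 =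
        PySem.List.pyRange 0 ((Arr.length - 2 : Nat) : Int) 1 := by
      by_cases h2 : 2 ≤ Arr.length
      · congr 1; omega
      · rw [PySem.List.pyRange_one_eq_nil (by omega), PySem.List.pyRange_one_eq_nil (by omega)]
    rw [hMA, hr, pvScanAux Arr K (Arr.length - 2) (by omega)]
    show pvA_greedy (PySem.Dict.counter (pvM Arr K))
        (PySem.List.sorted (PySem.Set.ofList (pvM Arr K)) (fun x => x)) 0 K =
      pvB_take (PySem.List.sorted (pvM Arr K) (fun x => x)) 0 K
    by_cases hK : 0 ≤ K
    · rw [pvSortedFlat (pvM Arr K)]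
      refine pvGreedyEq _ _ (PySem.Dict.getD_counter _) _ 0 K
        (PySem.List.sorted_ofList_pairwise_lt _) (fun p hp => ?_) hK
      have hpM : p ∈ pvM Arr K :=
        (PySem.Set.mem_ofList _ _).mp ((PySem.List.mem_sorted _ _ _ _).mp hp)
      refine ⟨?_, hpM⟩
      obtain ⟨u, -, hu⟩ := List.mem_map.mp hpM
      rw [← hu]
      exact abs_nonneg _
    · have hM : pvM Arr K = [] := by
        unfold pvM
        rw [List.filter_eq_nil_iff.mpr ?_]
        · rfl
        · intro u _
          unfold pvCB
          rw [decide_eq_true_iff]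
          rintro ⟨-, habs⟩
          have := abs_nonneg (PySem.List.pyGetD Arr (u : Int) 0 - PySem.List.pyGetD Arr ((u : Int) + 1) 0)
          unfold pvCost at habs
          omega
      rw [hM]
      rfl
  · rw [if_pos hB]
    have hOd : pvOd Arr = (List.map (fun x => PySem.Int.mod x 2) Arr).sum := rfl
    have hG : 2 * pvOd Arr ≠ (Arr.length : Int) := by omega
    have hMA : pvMA Arr K = [] := by
      unfold pvMA
      rw [List.filter_eq_nil_iff.mpr (fun u _ => by rw [pvCA_false Arr K hG u]; simp)]
      rfl
    rw [hMA]
    rfl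

-- ===== VERDICT (by name: the statement is the Claim_ definition above) =====
theorem TheAmazingFunction_spec : Claim_equal_TheAmazingFunction := by
  intro Arr K _
  unfold Spec_TheAmazingFunction
  exact pvMain Arr K
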